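-- pv_equiv track=rewrite | github.com/schin-300/pr-guy-hermes-agent | hermes_cli/auth_tui.py | _circle_offsets
-- ===== SOURCE A (Python) =====
-- _CIRCLE_OFFSETS_BY_RADIUS: dict[int, tuple[tuple[int, int], ...]] = {}
--
-- def _circle_offsets(radius: int) -> tuple[tuple[int, int], ...]:
--     cached = _CIRCLE_OFFSETS_BY_RADIUS.get(radius)
--     if cached is not None:
--         return cached
--     offsets: list[tuple[int, int]] = []
--     for dy in range(-radius, radius + 1):
--         for dx in range(-radius, radius + 1):
--             if dx * dx + dy * dy <= radius * radius:
--                 offsets.append((dx, dy))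
--     cached = tuple(offsets)
--     _CIRCLE_OFFSETS_BY_RADIUS[radius] = cached
--     return cached
-- ===== SOURCE B (Python) =====
-- _CIRCLE_OFFSETS_BY_RADIUS: dict[int, tuple[tuple[int, int], ...]] = {}
--
-- def _circle_offsets(radius: int) -> tuple[tuple[int, int], ...]:
--     try:
--         return _CIRCLE_OFFSETS_BY_RADIUS[radius]
--     except KeyError:
--         pass
--     r2 = radius * radius
--     # Shrinking-extent scan: ext[dy] = largest s >= 0 with s*s + dy*dy <= r2,
--     # computed with a single pointer that only moves down (amortized O(radius)).
--     ext: list[int] = []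
--     s = radius
--     for dy in range(0, radius + 1):
--         while s * s + dy * dy > r2:
--             s -= 1
--         ext.append(s)
--     offsets: list[tuple[int, int]] = []
--     for dy in range(-radius, radius + 1):
--         e = ext[abs(dy)]
--         offsets.extend((dx, dy) for dx in range(-e, e + 1))
--     result = _CIRCLE_OFFSETS_BY_RADIUS[radius] = tuple(offsets)
--     return result
-- ===== Notes on version B (the rewrite author's own statement) =====
-- stated objective: alternative
-- what changed: Replaces the full-grid scan with a per-cell distance test by a shrinking-extent pointer that computes each row's half-width once (amortized O(radius) extent work) and emits each row as a plain range; the memo-dict wrapper is kept unchanged.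
import Mathlib
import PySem

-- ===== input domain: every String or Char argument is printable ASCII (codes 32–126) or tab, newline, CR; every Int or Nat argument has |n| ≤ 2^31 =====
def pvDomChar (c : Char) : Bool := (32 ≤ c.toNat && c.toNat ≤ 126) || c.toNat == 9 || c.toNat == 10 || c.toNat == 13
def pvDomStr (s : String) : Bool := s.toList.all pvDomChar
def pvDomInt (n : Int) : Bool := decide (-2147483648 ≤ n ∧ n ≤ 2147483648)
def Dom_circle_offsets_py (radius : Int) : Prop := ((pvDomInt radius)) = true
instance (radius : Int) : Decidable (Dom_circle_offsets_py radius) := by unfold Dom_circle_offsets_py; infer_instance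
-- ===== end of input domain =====

-- B replaces A's per-cell distance test over the full (2r+1)^2 grid by a shrinking-extent
-- pointer computing each row's half-width once (objective: alternative row-driven algorithm).
-- The module-level memo dict in both Pythons only caches and returns the same value; the
-- equivalence proved here is about the return value (the ports compute without the cache).

-- ===== PORT A =====
def circle_offsets_py (radius : Int) : List (Int × Int) :=
  (PySem.List.pyRange (-radius) (radius + 1) 1).foldl
    (fun offsets dy =>
      (PySem.List.pyRange (-radius) (radius + 1) 1).foldl
        (fun offsets dx =>
          if dx * dx + dy * dy ≤ radius * radius then offsets ++ [(dx, dy)] else offsets)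
        offsets)
    []

-- ===== PORT B =====
-- the inner 'while s*s+dy*dy > r2: s -= 1' loop, ported with explicit fuel; fuel s.toNat+1 is
-- exact here: the loop stops at some t with 0 ≤ t ≤ s, hence makes at most s ≤ fuel steps
def pvShrink (r2 dy2 : Int) : Nat → Int → Int
  | 0, s => s
  | fuel + 1, s => if r2 < s * s + dy2 then pvShrink r2 dy2 fuel (s - 1) else s

def circle_offsets_py_alt (radius : Int) : List (Int × Int) :=
  let r2 := radius * radius
  let st :=
    (PySem.List.pyRange 0 (radius + 1) 1).foldl
      (fun (st : List Int × Int) dy =>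
        let s := pvShrink r2 (dy * dy) (st.2.toNat + 1) st.2
        (st.1 ++ [s], s))
      ([], radius)
  let ext := st.1
  (PySem.List.pyRange (-radius) (radius + 1) 1).foldl
    (fun offsets dy =>
      -- ext[abs(dy)]: the index is always in range here, so getD with default 0 is exact
      let e := PySem.List.pyGetD ext |dy| 0
      offsets ++ (PySem.List.pyRange (-e) (e + 1) 1).map (fun dx => (dx, dy)))
    []

-- ===== PRECONDITION & SPEC =====
def Spec_circle_offsets_py (radius : Int) (out : List (Int × Int)) : Prop := out = circle_offsets_py_alt radius
instance (radius : Int) (out : List (Int × Int)) : Decidable (Spec_circle_offsets_py radius out) := by unfold Spec_circle_offsets_py; infer_instance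

-- ===== CLAIM (what is proved, stated in full; the proofs are below) =====
def Claim_equal_circle_offsets_py : Prop := ∀ (radius : Int), Dom_circle_offsets_py radius → Spec_circle_offsets_py radius (circle_offsets_py radius)

-- ===== LEMMAS AND PROOFS =====

-- the mathematical half-width of row dy: largest e ≥ 0 with e^2 ≤ r^2 - dy^2
def pvE (r dy : Int) : Int := (Nat.sqrt (r * r - dy * dy).toNat : Int)

theorem pvE_nonneg (r dy : Int) : 0 ≤ pvE r dy := by
  unfold pvE; positivity

theorem pvE_sq_le (r dy : Int) (h : dy * dy ≤ r * r) : pvE r dy * pvE r dy ≤ r * r - dy * dy := by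
  unfold pvE
  have h0 : (0:Int) ≤ r * r - dy * dy := by omega
  have h1 : Nat.sqrt (r * r - dy * dy).toNat ^ 2 ≤ (r * r - dy * dy).toNat := Nat.sqrt_le' _
  have h2 : ((Nat.sqrt (r * r - dy * dy).toNat : Int)) ^ 2 ≤ (((r * r - dy * dy).toNat : Nat) : Int) := by
    exact_mod_cast h1
  have h3 : (((r * r - dy * dy).toNat : Nat) : Int) = r * r - dy * dy := Int.toNat_of_nonneg h0
  nlinarith [h2, h3]

theorem pvE_succ_sq_gt (r dy : Int) :
    r * r - dy * dy < (pvE r dy + 1) * (pvE r dy + 1) := by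
  unfold pvE
  have h1 : (r * r - dy * dy).toNat < Nat.succ (Nat.sqrt (r * r - dy * dy).toNat) ^ 2 :=
    Nat.lt_succ_sqrt' _
  have h : (((r * r - dy * dy).toNat : Nat) : Int)
      < ((Nat.sqrt (r * r - dy * dy).toNat : Int) + 1) ^ 2 := by exact_mod_cast h1
  have h2 : r * r - dy * dy ≤ ((r * r - dy * dy).toNat : Int) := Int.self_le_toNat _
  nlinarith [h, h2]

theorem pvE_le_r (r dy : Int) (hr : 0 ≤ r) : pvE r dy ≤ r := by
  unfold pvE
  have h1 : (r * r - dy * dy).toNat ≤ r.toNat * r.toNat := by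
    have := sq_nonneg dy
    have h2 : r * r - dy * dy ≤ r * r := by nlinarith
    have h3 : ((r.toNat : Int)) = r := Int.toNat_of_nonneg hr
    have h4 : r * r = ((r.toNat * r.toNat : Nat) : Int) := by push_cast; rw [h3]
    omega
  have h5 : Nat.sqrt (r * r - dy * dy).toNat ≤ Nat.sqrt (r.toNat * r.toNat) :=
    Nat.sqrt_le_sqrt h1
  have h6 : Nat.sqrt (r.toNat * r.toNat) = r.toNat := by
    have := Nat.sqrt_eq' r.toNat
    rwa [pow_two] at this
  have h3 : ((r.toNat : Int)) = r := Int.toNat_of_nonneg hr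
  omega

theorem pvE_antitone (r a b : Int) (hab : a ≤ b) (ha : 0 ≤ a) : pvE r b ≤ pvE r a := by
  unfold pvE
  have : (r * r - b * b).toNat ≤ (r * r - a * a).toNat := by
    have : a * a ≤ b * b := by nlinarith
    omega
  exact_mod_cast Nat.sqrt_le_sqrt this

-- the fuelled while-loop lands exactly on e, the greatest admissible value ≤ s
theorem pvShrink_eq (r2 dy2 e : Int) (he0 : 0 ≤ e) (hle : e * e + dy2 ≤ r2)
    (hgt : r2 < (e + 1) * (e + 1) + dy2) :
    ∀ (fuel : Nat) (s : Int), e ≤ s → s - e ≤ (fuel : Int) → pvShrink r2 dy2 fuel s = e := by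
  intro fuel
  induction fuel with
  | zero =>
    intro s hs hf
    have : s = e := by omega
    simp [pvShrink, this]
  | succ f ih =>
    intro s hs hf
    rcases eq_or_lt_of_le hs with h | h
    · subst h
      have hc : ¬ r2 < e * e + dy2 := by omega
      simp [pvShrink, hc]
    · have hc : r2 < s * s + dy2 := by
        have h1 : e + 1 ≤ s := by omega
        have : (e + 1) * (e + 1) ≤ s * s := by nlinarith
        omega
      simp only [pvShrink, if_pos hc]
      exact ih (s - 1) (by omega) (by omega)

-- the extent-building fold produces exactly the list of pvE values (with invariant pvE r a ≤ s)
theorem pvExtFold (r : Int) (hr : 0 ≤ r) :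
    ∀ (n : Nat) (a : Int), (r + 1 - a).toNat = n → 0 ≤ a → a ≤ r →
      ∀ (s : Int) (acc : List Int), pvE r a ≤ s →
      (PySem.List.pyRange a (r + 1) 1).foldl
        (fun (st : List Int × Int) dy =>
          (st.1 ++ [pvShrink (r * r) (dy * dy) (st.2.toNat + 1) st.2], pvShrink (r * r) (dy * dy) (st.2.toNat + 1) st.2))
        (acc, s)
      = (acc ++ (PySem.List.pyRange a (r + 1) 1).map (pvE r), pvE r r) := by
  intro n
  induction n with
  | zero => intro a hn ha har; omega
  | succ m ih =>
    intro a hn ha har s acc hse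
    have hab : a < r + 1 := by omega
    rw [PySem.List.pyRange_one_cons hab]
    have hdy2 : a * a ≤ r * r := by nlinarith
    have hs0 : 0 ≤ s := le_trans (pvE_nonneg r a) hse
    have hstep : pvShrink (r * r) (a * a) (s.toNat + 1) s = pvE r a := by
      apply pvShrink_eq (r * r) (a * a) (pvE r a) (pvE_nonneg r a)
        (by have := pvE_sq_le r a hdy2; omega)
        (by have := pvE_succ_sq_gt r a; omega)
        (s.toNat + 1) s hse
      have := pvE_nonneg r a
      omega
    simp only [List.foldl_cons, List.map_cons, hstep]
    rcases eq_or_lt_of_le (show a + 1 ≤ r + 1 by omega) with heq | hlt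
    · have hnil : PySem.List.pyRange (a + 1) (r + 1) 1 = [] :=
        PySem.List.pyRange_one_eq_nil (by omega)
      rw [hnil]
      have har' : a = r := by omega
      subst har'
      simp
    · have := ih (a + 1) (by omega) (by omega) (by omega) (pvE r a) (acc ++ [pvE r a])
        (pvE_antitone r a (a + 1) (by omega) ha)
      rw [this]
      simp

-- membership criterion for a row: dx^2 + dy^2 ≤ r^2 ↔ |dx| ≤ pvE r dy
theorem pvRow_iff (r dy dx : Int) (hdy : dy * dy ≤ r * r) :
    (dx * dx + dy * dy ≤ r * r) ↔ (-(pvE r dy) ≤ dx ∧ dx ≤ pvE r dy) := by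
  set e := pvE r dy with he
  have he0 : 0 ≤ e := pvE_nonneg r dy
  have h1 : e * e ≤ r * r - dy * dy := pvE_sq_le r dy hdy
  have h2 : r * r - dy * dy < (e + 1) * (e + 1) := pvE_succ_sq_gt r dy
  constructor
  · intro h
    constructor
    · by_contra hc; rw [not_le] at hc
      have : e + 1 ≤ -dx := by omega
      have : (e + 1) * (e + 1) ≤ (-dx) * (-dx) := by nlinarith
      nlinarith
    · by_contra hc; rw [not_le] at hc
      have : e + 1 ≤ dx := by omega
      have : (e + 1) * (e + 1) ≤ dx * dx := by nlinarith
      nlinarith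
  · rintro ⟨hl, hr2⟩
    have : dx * dx ≤ e * e := by nlinarith
    omega

-- A's filtered full row equals B's closed-form row range
theorem pvRow_eq (r dy : Int) (hr : 0 ≤ r) (hdy : dy * dy ≤ r * r) :
    (PySem.List.pyRange (-r) (r + 1) 1).filter (fun dx => decide (dx * dx + dy * dy ≤ r * r))
      = PySem.List.pyRange (-(pvE r dy)) (pvE r dy + 1) 1 := by
  set e := pvE r dy with he
  have he0 : 0 ≤ e := pvE_nonneg r dy
  have her : e ≤ r := pvE_le_r r dy hr
  rw [PySem.List.pyRange_one_append (-r) (-e) (r + 1) (by omega) (by omega),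
      PySem.List.pyRange_one_append (-e) (e + 1) (r + 1) (by omega) (by omega)]
  rw [List.filter_append, List.filter_append]
  have hleft : (PySem.List.pyRange (-r) (-e) 1).filter (fun dx => decide (dx * dx + dy * dy ≤ r * r)) = [] := by
    rw [List.filter_eq_nil_iff]
    intro x hx
    rw [PySem.List.mem_pyRange_one] at hx
    simp only [decide_eq_true_eq]
    intro hc
    have := (pvRow_iff r dy x hdy).1 hc
    omega
  have hright : (PySem.List.pyRange (e + 1) (r + 1) 1).filter (fun dx => decide (dx * dx + dy * dy ≤ r * r)) = [] := by
    rw [List.filter_eq_nil_iff]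
    intro x hx
    rw [PySem.List.mem_pyRange_one] at hx
    simp only [decide_eq_true_eq]
    intro hc
    have := (pvRow_iff r dy x hdy).1 hc
    omega
  have hmid : (PySem.List.pyRange (-e) (e + 1) 1).filter (fun dx => decide (dx * dx + dy * dy ≤ r * r))
      = PySem.List.pyRange (-e) (e + 1) 1 := by
    rw [List.filter_eq_self]
    intro x hx
    rw [PySem.List.mem_pyRange_one] at hx
    simp only [decide_eq_true_eq]
    exact (pvRow_iff r dy x hdy).2 ⟨hx.1, by omega⟩
  rw [hleft, hright, hmid, List.nil_append, List.append_nil]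

-- ===== VERDICT (by name: the statement is the Claim_ definition above) =====
theorem circle_offsets_py_spec : Claim_equal_circle_offsets_py := by
  intro radius _
  unfold Spec_circle_offsets_py
  simp only [circle_offsets_py, circle_offsets_py_alt]
  rcases Int.lt_or_le radius 0 with hr | hr
  · rw [PySem.List.pyRange_one_eq_nil (show radius + 1 ≤ -radius by omega),
        PySem.List.pyRange_one_eq_nil (show (radius : Int) + 1 ≤ 0 by omega)]
    simp
  · rw [pvExtFold radius hr (radius + 1).toNat 0 (by omega) le_rfl hr radius []
        (pvE_le_r radius 0 hr)]
    simp only [List.nil_append]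
    apply PySem.List.foldl_congr_mem
    intro acc dy hdy
    rw [PySem.List.mem_pyRange_one] at hdy
    have hdy2 : dy * dy ≤ radius * radius := by nlinarith
    have habs : |dy| ≤ radius := by
      rcases abs_cases dy with ⟨h1, _⟩ | ⟨h1, _⟩ <;> omega
    have habs0 : 0 ≤ |dy| := abs_nonneg dy
    have hget : PySem.List.pyGetD ((PySem.List.pyRange 0 (radius + 1) 1).map (pvE radius)) |dy| 0
        = pvE radius |dy| :=
      PySem.List.pyGetD_map_pyRange_of_nonneg (pvE radius) (radius + 1) |dy| 0 habs0 (by omega)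
    have hEabs : pvE radius |dy| = pvE radius dy := by
      unfold pvE
      rw [abs_mul_abs_self]
    rw [PySem.List.foldl_append_ite (fun dx => dx * dx + dy * dy ≤ radius * radius) (fun dx => (dx, dy)),
        pvRow_eq radius dy hr hdy2]
    simp only [hget, hEabs]
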